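-- pv_equiv track=rewrite | github.com/boona13/ghost | ghost_comfy_compat/comfy_package/utils.py | state_dict_prefix_replace
-- ===== SOURCE A (Python) =====
-- def state_dict_prefix_replace(state_dict: dict, replace_prefix: dict,
--                               filter_keys: bool = False) -> dict:
--     out = {}
--     for k, v in state_dict.items():
--         replaced = False
--         for prefix_from, prefix_to in replace_prefix.items():
--             if k.startswith(prefix_from):
--                 out[prefix_to + k[len(prefix_from):]] = v
--                 replaced = True
--                 break
--         if not replaced and not filter_keys:
--             out[k] = v
--     return out
-- ===== SOURCE B (Python) =====
-- def state_dict_prefix_replace(state_dict: dict, replace_prefix: dict,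
--                               filter_keys: bool = False) -> dict:
--     # Phase 1 (prefix-outer): assign each key its new name under the first
--     # matching prefix; a key already assigned is never reassigned, so the
--     # earliest prefix in replace_prefix order wins, as in the key-outer form.
--     new_name = {}
--     for prefix_from, prefix_to in replace_prefix.items():
--         for k in state_dict:
--             if k not in new_name and k.startswith(prefix_from):
--                 new_name[k] = prefix_to + k[len(prefix_from):]
--     # Phase 2: emit in state_dict order (so the output order is unchanged).
--     out = {}
--     for k, v in state_dict.items():
--         if k in new_name:
--             out[new_name[k]] = v
--         elif not filter_keys:
--             out[k] = v
--     return out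
-- ===== Notes on version B (the rewrite author's own statement) =====
-- stated objective: alternative
-- what changed: Loop nesting is flipped into a two-phase form: an outer loop over replace_prefix first builds a key->new-name map (first prefix wins because assigned keys are skipped), then a single pass over state_dict emits the output; A instead scans all prefixes inside the per-key loop with a flag and break.
import Mathlib
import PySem

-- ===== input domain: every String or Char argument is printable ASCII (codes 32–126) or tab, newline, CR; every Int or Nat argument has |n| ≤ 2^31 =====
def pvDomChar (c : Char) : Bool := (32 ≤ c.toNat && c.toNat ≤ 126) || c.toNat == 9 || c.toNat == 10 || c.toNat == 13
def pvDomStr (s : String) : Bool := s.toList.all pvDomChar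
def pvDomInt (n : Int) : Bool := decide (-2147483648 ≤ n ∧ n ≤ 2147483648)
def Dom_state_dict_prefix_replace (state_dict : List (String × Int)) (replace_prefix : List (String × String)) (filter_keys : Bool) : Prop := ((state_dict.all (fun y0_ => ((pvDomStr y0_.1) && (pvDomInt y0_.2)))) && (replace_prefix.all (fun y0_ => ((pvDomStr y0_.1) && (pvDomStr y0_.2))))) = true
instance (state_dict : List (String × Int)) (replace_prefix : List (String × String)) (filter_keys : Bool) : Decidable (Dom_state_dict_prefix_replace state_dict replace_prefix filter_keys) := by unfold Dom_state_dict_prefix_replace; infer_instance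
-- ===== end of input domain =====

-- B flips the loop nesting into two phases (prefix-outer rename map, then one emission pass); same cost, alternative structure.
-- ===== PORT A =====
-- inner 'for prefix_from, prefix_to in replace_prefix.items(): … break' with the 'replaced' flag
def sdprLoopA (k : String) (v : Int) (out : PySem.Dict String Int) :
    List (String × String) → PySem.Dict String Int × Bool
  | [] => (out, false)
  | (prefix_from, prefix_to) :: rest =>
      if PySem.Str.startswith k prefix_from then
        (out.insert (prefix_to ++ PySem.Str.slice k (some (PySem.Str.len prefix_from)) none) v, true)
      else
        sdprLoopA k v out rest

def state_dict_prefix_replace (state_dict : List (String × Int)) (replace_prefix : List (String × String)) (filter_keys : Bool) : List (String × Int) :=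
  (state_dict.foldl
    (fun out kv =>
      let r := sdprLoopA kv.1 kv.2 out replace_prefix
      if !r.2 && !filter_keys then r.1.insert kv.1 kv.2 else r.1)
    PySem.Dict.empty).items

-- ===== PORT B =====
-- Phase 1: for prefix_from, prefix_to in replace_prefix.items(): for k in state_dict: if k not in new_name and k.startswith(...)
def sdprPhase1 (state_dict : List (String × Int)) (replace_prefix : List (String × String)) :
    PySem.Dict String String :=
  replace_prefix.foldl
    (fun nn p =>
      state_dict.foldl
        (fun nn kv =>
          if !nn.contains kv.1 && PySem.Str.startswith kv.1 p.1 then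
            nn.insert kv.1 (p.2 ++ PySem.Str.slice kv.1 (some (PySem.Str.len p.1)) none)
          else nn)
        nn)
    PySem.Dict.empty

def state_dict_prefix_replace_alt (state_dict : List (String × Int)) (replace_prefix : List (String × String)) (filter_keys : Bool) : List (String × Int) :=
  let new_name := sdprPhase1 state_dict replace_prefix
  -- Phase 2: emit in state_dict order ('if k in new_name: out[new_name[k]] = v; elif not filter_keys: out[k] = v')
  (state_dict.foldl
    (fun out kv =>
      match new_name.get? kv.1 with
      | some nk => out.insert nk kv.2
      | none => if filter_keys then out else out.insert kv.1 kv.2)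
    PySem.Dict.empty).items

-- ===== PRECONDITION & SPEC =====
def Spec_state_dict_prefix_replace (state_dict : List (String × Int)) (replace_prefix : List (String × String)) (filter_keys : Bool) (out : List (String × Int)) : Prop := out = state_dict_prefix_replace_alt state_dict replace_prefix filter_keys
instance (state_dict : List (String × Int)) (replace_prefix : List (String × String)) (filter_keys : Bool) (out : List (String × Int)) : Decidable (Spec_state_dict_prefix_replace state_dict replace_prefix filter_keys out) := by unfold Spec_state_dict_prefix_replace; infer_instance

-- ===== CLAIM =====
def Claim_equal_state_dict_prefix_replace : Prop := ∀ (state_dict : List (String × Int)) (replace_prefix : List (String × String)) (filter_keys : Bool), Dom_state_dict_prefix_replace state_dict replace_prefix filter_keys → Spec_state_dict_prefix_replace state_dict replace_prefix filter_keys (state_dict_prefix_replace state_dict replace_prefix filter_keys)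

-- ===== LEMMAS AND PROOFS =====
-- the value A's inner loop assigns to key k: first matching prefix, if any
def sdprFirstMatch (replace_prefix : List (String × String)) (k : String) : Option String :=
  replace_prefix.findSome? (fun p =>
    if PySem.Str.startswith k p.1 then
      some (p.2 ++ PySem.Str.slice k (some (PySem.Str.len p.1)) none)
    else none)

lemma sdprLoopA_eq (k : String) (v : Int) (out : PySem.Dict String Int)
    (rp : List (String × String)) :
    sdprLoopA k v out rp =
      match sdprFirstMatch rp k with
      | some nk => (out.insert nk v, true)
      | none => (out, false) := by
  induction rp with
  | nil => rfl
  | cons p rest ih =>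
    obtain ⟨pf, pt⟩ := p
    simp only [sdprLoopA, sdprFirstMatch, List.findSome?] at ih ⊢
    by_cases h : PySem.Str.startswith k pf
    · rw [if_pos h, if_pos h]
    · rw [if_neg h, if_neg h, ih]

-- one prefix's inner pass over state_dict: keys already assigned are skipped
lemma sdprInner_get? (sd : List (String × Int)) (p : String × String)
    (nn : PySem.Dict String String) (k : String) :
    (sd.foldl
      (fun nn kv =>
        if !nn.contains kv.1 && PySem.Str.startswith kv.1 p.1 then
          nn.insert kv.1 (p.2 ++ PySem.Str.slice kv.1 (some (PySem.Str.len p.1)) none)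
        else nn)
      nn).get? k =
    match nn.get? k with
    | some v => some v
    | none =>
        if k ∈ sd.map Prod.fst ∧ PySem.Str.startswith k p.1 then
          some (p.2 ++ PySem.Str.slice k (some (PySem.Str.len p.1)) none)
        else none := by
  induction sd generalizing nn with
  | nil => cases h : nn.get? k <;> simp [h]
  | cons kv rest ih =>
    simp only [List.foldl, List.map, List.mem_cons]
    cases hc : nn.contains kv.1 with
    | true =>
      rw [if_neg (by simp), ih]
      cases hk : nn.get? k with
      | some v => rfl
      | none =>
        have hne : k ≠ kv.1 := by
          intro he; subst he
          rw [PySem.Dict.contains_eq_isSome_get?, hk] at hc; simp at hc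
        split_ifs with h1 h2 <;> first | rfl | (exfalso; tauto)
    | false =>
      have hk0 : nn.get? kv.1 = none := by
        rw [PySem.Dict.contains_eq_isSome_get?] at hc
        cases h : nn.get? kv.1 <;> simp [h] at hc ⊢
      cases hs : PySem.Str.startswith kv.1 p.1 with
      | true =>
        have hcs : PySem.Chars.startswith kv.1.toList p.1.toList = true := hs
        rw [if_pos (by decide)]
        rw [ih]
        by_cases he : k = kv.1
        · subst he
          rw [PySem.Dict.get?_insert_self, hk0]
          simp [hcs]
        · rw [PySem.Dict.get?_insert_of_ne nn _ he]
          cases hk : nn.get? k with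
          | some v => rfl
          | none => split_ifs with h1 h2 <;> first | rfl | (exfalso; tauto)
      | false =>
        rw [if_neg (by simp), ih]
        cases hk : nn.get? k with
        | some v => rfl
        | none =>
          have hnot : ¬ (k = kv.1 ∧ PySem.Str.startswith k p.1 = true) := by
            rintro ⟨he, hsw⟩; subst he; rw [hs] at hsw; exact Bool.false_ne_true hsw
          split_ifs with h1 h2 <;> first | rfl | (exfalso; tauto)

-- phase 1 computes first-match over the prefix list, for keys of state_dict
lemma sdprPhase1_fold_get? (sd : List (String × Int)) (rp : List (String × String))
    (nn : PySem.Dict String String) (k : String) :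
    ((rp.foldl
      (fun nn p =>
        sd.foldl
          (fun nn kv =>
            if !nn.contains kv.1 && PySem.Str.startswith kv.1 p.1 then
              nn.insert kv.1 (p.2 ++ PySem.Str.slice kv.1 (some (PySem.Str.len p.1)) none)
            else nn)
          nn)
      nn).get? k) =
    match nn.get? k with
    | some v => some v
    | none => if k ∈ sd.map Prod.fst then sdprFirstMatch rp k else none := by
  induction rp generalizing nn with
  | nil =>
    cases h : nn.get? k with
    | some v => simp [h]
    | none => simp [h, sdprFirstMatch]
  | cons p rest ih =>
    simp only [List.foldl]
    rw [ih, sdprInner_get?]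
    cases hk : nn.get? k with
    | some v => rfl
    | none =>
      by_cases hm : k ∈ sd.map Prod.fst
      ·         cases hs : PySem.Str.startswith k p.1 with
        | true =>
          have hcs : PySem.Chars.startswith k.toList p.1.toList = true := hs
          simp [hm, hcs, sdprFirstMatch, List.findSome?]
        | false =>
          have hcs : PySem.Chars.startswith k.toList p.1.toList = false := hs
          simp [hm, hcs, sdprFirstMatch, List.findSome?]
      · simp [hm]

lemma sdprPhase1_get? (sd : List (String × Int)) (rp : List (String × String))
    (k : String) (hk : k ∈ sd.map Prod.fst) :
    (sdprPhase1 sd rp).get? k = sdprFirstMatch rp k := by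
  unfold sdprPhase1
  rw [sdprPhase1_fold_get?]
  simp [hk, PySem.Dict.get?_empty]

-- ===== VERDICT =====
theorem state_dict_prefix_replace_spec : Claim_equal_state_dict_prefix_replace := by
  intro sd rp fk _
  unfold Spec_state_dict_prefix_replace state_dict_prefix_replace state_dict_prefix_replace_alt
  congr 1
  apply PySem.List.foldl_congr_mem
  intro out kv hmem
  rw [sdprLoopA_eq, sdprPhase1_get? sd rp kv.1 (List.mem_map_of_mem hmem)]
  cases h : sdprFirstMatch rp kv.1 with
  | some nk => simp
  | none => cases fk <;> simp
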